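-- pv_equiv track=rewrite | github.com/asweigart/programmedpatterns | book/visualpatterns.py | pattern62
-- ===== SOURCE A (Python) =====
-- def pattern62(step):
--     width = 1
--     height = 1
--     for i in range(2, step + 1):
--         if i % 2 == 0:
--             width += 2
--             height += 2
--         else:
--             height -= 1
--     row = ('O' * width) + '\n'
--     pattern = row * height
--     return pattern
-- ===== SOURCE B (Python) =====
-- def pattern62(step):
--     # closed-form dimensions: e = evens in [2, step], o = odds in [2, step]
--     e = step // 2 if step >= 2 else 0
--     o = (step - 1) // 2 if step >= 2 else 0
--     row = 'O' * (1 + 2 * e) + '\n'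
--     return row * (1 + 2 * e - o)
-- ===== Notes on version B (the rewrite author's own statement) =====
-- stated objective: simpler
-- what changed: Replaced the accumulation loop over range(2, step+1) with a closed-form computation of the two dimensions (counts of evens/odds in [2, step] via floor division), then builds the same row*height string.
import Mathlib
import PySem

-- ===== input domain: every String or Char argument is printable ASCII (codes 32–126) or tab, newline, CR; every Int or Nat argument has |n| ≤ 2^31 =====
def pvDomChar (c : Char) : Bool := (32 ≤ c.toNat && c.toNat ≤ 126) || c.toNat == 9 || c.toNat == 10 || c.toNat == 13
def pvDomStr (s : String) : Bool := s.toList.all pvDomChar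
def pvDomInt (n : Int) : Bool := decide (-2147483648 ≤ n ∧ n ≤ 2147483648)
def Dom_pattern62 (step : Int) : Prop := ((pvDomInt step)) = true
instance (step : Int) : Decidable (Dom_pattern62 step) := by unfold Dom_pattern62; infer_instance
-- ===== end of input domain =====

-- B computes the rectangle's width and height in closed form instead of accumulating them in a loop (simpler; same output).

-- ===== PORT A =====
def pattern62Loop (step : Int) : Int × Int :=
  (PySem.List.pyRange 2 (step + 1) 1).foldl
    (fun wh i => if PySem.Int.mod i 2 == 0 then (wh.1 + 2, wh.2 + 2) else (wh.1, wh.2 - 1))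
    (1, 1)

def pattern62 (step : Int) : String :=
  let wh := pattern62Loop step
  let row := PySem.List.pyRepeat ['O'] wh.1 ++ ['\n']
  String.ofList (PySem.List.pyRepeat row wh.2)

-- ===== PORT B =====
def pattern62_alt (step : Int) : String :=
  let e := if 2 ≤ step then PySem.Int.floordiv step 2 else 0
  let o := if 2 ≤ step then PySem.Int.floordiv (step - 1) 2 else 0
  let row := PySem.List.pyRepeat ['O'] (1 + 2 * e) ++ ['\n']
  String.ofList (PySem.List.pyRepeat row (1 + 2 * e - o))

-- ===== PRECONDITION & SPEC =====
def Spec_pattern62 (step : Int) (out : String) : Prop := out = pattern62_alt step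
instance (step : Int) (out : String) : Decidable (Spec_pattern62 step out) := by unfold Spec_pattern62; infer_instance

-- ===== CLAIM (what is proved, stated in full; the proofs are below) =====
def Claim_equal_pattern62 : Prop := ∀ (step : Int), Dom_pattern62 step → Spec_pattern62 step (pattern62 step)

-- ===== LEMMAS AND PROOFS =====
theorem pattern62Loop_eval (step : Int) (h : 2 ≤ step) :
    pattern62Loop step =
      (1 + 2 * PySem.Int.floordiv step 2,
       1 + 2 * PySem.Int.floordiv step 2 - PySem.Int.floordiv (step - 1) 2) := by
  induction step, h using Int.le_induction with
  | base => decide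
  | succ n hn ih =>
      have hsplit : PySem.List.pyRange 2 (n + 1 + 1) 1 =
          PySem.List.pyRange 2 (n + 1) 1 ++ [n + 1] :=
        PySem.List.pyRange_one_succ_right (by omega)
      unfold pattern62Loop at ih ⊢
      rw [hsplit, List.foldl_append, ih]
      have two_pos : (0 : Int) < 2 := by norm_num
      have b1 := (PySem.Int.floordiv_eq_iff_of_pos (a := n) (b := 2) two_pos).mp rfl
      have b2 := (PySem.Int.floordiv_eq_iff_of_pos (a := n - 1) (b := 2) two_pos).mp rfl
      have b3 := (PySem.Int.floordiv_eq_iff_of_pos (a := n + 1) (b := 2) two_pos).mp rfl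
      have heq : n + 1 - 1 = n := by ring
      rw [heq]
      rcases Int.even_or_odd (n + 1) with he | ho
      · have h0 : PySem.Int.mod (n + 1) 2 = 0 := by
          simpa using Int.even_iff.mp he
        have hp : (n + 1) % 2 = 0 := Int.even_iff.mp he
        simp only [List.foldl_cons, List.foldl_nil, h0, beq_self_eq_true, if_true,
          Prod.mk.injEq]
        constructor <;> omega
      · have h1 : PySem.Int.mod (n + 1) 2 = 1 := by
          simpa using Int.odd_iff.mp ho
        have hp : (n + 1) % 2 = 1 := Int.odd_iff.mp ho
        simp only [List.foldl_cons, List.foldl_nil, h1]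
        norm_num
        constructor <;> omega

theorem pattern62_spec : Claim_equal_pattern62 := by
  intro step _
  unfold Spec_pattern62 pattern62 pattern62_alt
  by_cases h : 2 ≤ step
  · rw [pattern62Loop_eval step h]
    simp [h]
  · have hnil : PySem.List.pyRange 2 (step + 1) 1 = [] :=
      PySem.List.pyRange_one_eq_nil (by omega)
    simp [pattern62Loop, hnil, h]
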